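-- pv_equiv track=rewrite | github.com/tfjmp/ProvMark | startTool/startCamflow.py | mergeNode
-- ===== SOURCE A (Python) =====
-- def findIdentifier(base, identifier):
-- 	for typeKey in base:
-- 		typeObj = base[typeKey]
-- 		#Found vertics elements group
-- 		if identifier in typeObj:
-- 			#If given identifier exists, it means the vertics exists
-- 			return True
-- 	return False
--
-- def extractElement(base, identifier):
-- 	for typeKey in base:
-- 		typeObj = base[typeKey]
-- 		if identifier in typeObj:
-- 			#Element found
-- 			return True,typeKey,identifier,typeObj[identifier]
-- 	return False,None,None,None
--
-- def mergeNode(base, model):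
-- 	targetKey = {'prov:entity','prov:activity','prov:agent','prov:informant','prov:informed','prov:trigger','prov:generatedEntity','prov:usedEntity','prov:plan','prov:delegate','prov:responsible','prov:influencer','prov:influencee','prov:generalEntity','prov:specificEntity','prov:alternate1','prov:alternate2','prov:collection'}
-- 	elementKey = {'entity','agent','activity'}
-- 	prefixKey = {'prefix'}
--
-- 	pending = dict()
-- 	for typeKey in base:
-- 		if (typeKey not in elementKey) and (typeKey not in prefixKey):
-- 			#Loop all relation elements group
-- 			typeObj = base[typeKey]
-- 			for relationKey in typeObj:
-- 				obj = typeObj[relationKey]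
-- 				for key in targetKey:
-- 					if key in obj:
-- 						#Find if the vertics related by this edges is exsits
-- 						if not findIdentifier(base, obj[key]):
-- 							exists,newTypeKey,newIdentifier,newObj = extractElement(model,obj[key])
-- 							if exists:
-- 								if (newTypeKey not in base):
-- 									if (newTypeKey not in pending):
-- 										newItem = {newIdentifier:newObj}
-- 										pending[newTypeKey] = newItem
-- 									else:
-- 										pending[newTypeKey][newIdentifier] = newObj
-- 								else:
-- 									base[newTypeKey][newIdentifier] = newObj
-- 	#Add Pending Item
-- 	for key in pending:
-- 		if (key not in base):
-- 			base[key] = pending[key]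
-- 		else:
-- 			for itemKey in pending[key]:
-- 				base[key][itemKey] = pending[key][itemKey]
--
-- 	return base
-- ===== SOURCE B (Python) =====
-- def mergeNode(base, model):
-- 	targetKey = {'prov:entity','prov:activity','prov:agent','prov:informant','prov:informed','prov:trigger','prov:generatedEntity','prov:usedEntity','prov:plan','prov:delegate','prov:responsible','prov:influencer','prov:influencee','prov:generalEntity','prov:specificEntity','prov:alternate1','prov:alternate2','prov:collection'}
-- 	skipKey = {'entity', 'agent', 'activity', 'prefix'}
--
-- 	# one pass over base: every identifier already present anywhere in base
-- 	present = {ident for group in base.values() for ident in group}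
-- 	# one pass over model: identifier -> (typeKey, node object), first group wins
-- 	index = {}
-- 	for typeKey, group in model.items():
-- 		for ident, obj in group.items():
-- 			if ident not in index:
-- 				index[ident] = (typeKey, obj)
--
-- 	handled = set()
-- 	pending = {}
-- 	for typeKey, group in base.items():
-- 		if typeKey in skipKey:
-- 			continue
-- 		for obj in group.values():
-- 			for key, ident in obj.items():
-- 				if key in targetKey and ident not in present and ident not in handled:
-- 					handled.add(ident)
-- 					hit = index.get(ident)
-- 					if hit is not None:
-- 						newTypeKey, newObj = hit
-- 						if newTypeKey in base:
-- 							base[newTypeKey][ident] = newObj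
-- 						else:
-- 							pending.setdefault(newTypeKey, {})[ident] = newObj
-- 	base.update(pending)
-- 	return base
-- ===== Notes on version B (the rewrite author's own statement) =====
-- stated objective: alternative
-- what changed: B replaces A's per-reference rescans (findIdentifier over all of base and extractElement over all of model for every referenced identifier) by a present-set over base and a model index built once up front, a handled-set for dedup, and a single reshaped collecting pass over the edge objects' items, merging pending into base with one dict update; it trades A's repeated scans for index-building passes.
import Mathlib
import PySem

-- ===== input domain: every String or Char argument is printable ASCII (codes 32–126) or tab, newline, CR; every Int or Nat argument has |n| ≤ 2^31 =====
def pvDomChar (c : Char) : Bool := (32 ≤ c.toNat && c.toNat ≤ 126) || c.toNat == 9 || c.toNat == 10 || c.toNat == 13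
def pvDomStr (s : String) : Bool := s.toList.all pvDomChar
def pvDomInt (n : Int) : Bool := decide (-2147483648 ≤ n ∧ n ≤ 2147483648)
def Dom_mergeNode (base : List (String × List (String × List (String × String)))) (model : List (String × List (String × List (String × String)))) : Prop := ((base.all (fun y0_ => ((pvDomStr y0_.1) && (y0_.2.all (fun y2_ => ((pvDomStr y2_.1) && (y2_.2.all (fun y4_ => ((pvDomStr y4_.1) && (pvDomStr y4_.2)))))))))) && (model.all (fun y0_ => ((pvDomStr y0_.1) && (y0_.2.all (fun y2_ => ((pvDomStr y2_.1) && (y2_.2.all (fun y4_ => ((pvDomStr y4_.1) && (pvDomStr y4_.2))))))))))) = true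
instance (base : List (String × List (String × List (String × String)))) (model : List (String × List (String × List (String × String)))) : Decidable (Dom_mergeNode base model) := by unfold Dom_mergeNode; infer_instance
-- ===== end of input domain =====

-- B replaces A's per-reference rescans of base and model by one present-set plus one model index built
-- up front, a dedup set, and a single reshaped collecting pass; both A and B mutate `base` in place in
-- Python (the equivalence proved here is about the RETURN value).

-- ===== PORT A =====
-- Python dicts are ported as PySem.Dict; the List inputs/outputs are converted at the boundary.
def pvToDict (b : List (String × List (String × List (String × String)))) : PySem.Dict String (PySem.Dict String (PySem.Dict String String)) :=
  PySem.Dict.mk (b.map (fun p => (p.1, PySem.Dict.mk (p.2.map (fun q => (q.1, PySem.Dict.mk q.2))))))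

def pvOfDict (d : PySem.Dict String (PySem.Dict String (PySem.Dict String String))) : List (String × List (String × List (String × String))) :=
  d.items.map (fun p => (p.1, p.2.items.map (fun q => (q.1, q.2.items))))

-- Python's targetKey is a set literal; A iterates it, whose hash order is not modelled: it is ported in
-- the literal's order, and Pre_ restricts to inputs where the result does not depend on that order.
def pvTargetKey : List String := ["prov:entity","prov:activity","prov:agent","prov:informant","prov:informed","prov:trigger","prov:generatedEntity","prov:usedEntity","prov:plan","prov:delegate","prov:responsible","prov:influencer","prov:influencee","prov:generalEntity","prov:specificEntity","prov:alternate1","prov:alternate2","prov:collection"]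
def pvElementKey : List String := ["entity","agent","activity"]
def pvPrefixKey : List String := ["prefix"]

def findIdentifier (base : PySem.Dict String (PySem.Dict String (PySem.Dict String String))) (identifier : String) : Bool :=
  base.items.any (fun p => p.2.contains identifier)

-- Python returns (True, typeKey, identifier, obj) or (False, None, None, None); ported as
-- Option (typeKey, obj) — the identifier component is the argument itself.
def extractElement (base : PySem.Dict String (PySem.Dict String (PySem.Dict String String))) (identifier : String) : Option (String × PySem.Dict String String) :=
  base.items.findSome? (fun p => if p.2.contains identifier then some (p.1, p.2.getD identifier PySem.Dict.empty) else none)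

-- body of A's innermost `for key in targetKey:` loop
def pvStepAKey (model : PySem.Dict String (PySem.Dict String (PySem.Dict String String))) (obj : PySem.Dict String String)
    (st : PySem.Dict String (PySem.Dict String (PySem.Dict String String)) × PySem.Dict String (PySem.Dict String (PySem.Dict String String)))
    (key : String) : PySem.Dict String (PySem.Dict String (PySem.Dict String String)) × PySem.Dict String (PySem.Dict String (PySem.Dict String String)) :=
  if obj.contains key then
    let identifier := obj.getD key ""
    if findIdentifier st.1 identifier then st
    else
      match extractElement model identifier with
      | some (newTypeKey, newObj) =>
        if st.1.contains newTypeKey = false then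
          if st.2.contains newTypeKey = false then
            (st.1, st.2.insert newTypeKey (PySem.Dict.mk [(identifier, newObj)]))
          else
            (st.1, st.2.insert newTypeKey ((st.2.getD newTypeKey PySem.Dict.empty).insert identifier newObj))
        else
          (st.1.insert newTypeKey ((st.1.getD newTypeKey PySem.Dict.empty).insert identifier newObj), st.2)
      | none => st
  else st

-- A's main triple loop over base (relation groups only); in Python the groups are read live from `base`,
-- whose group objects are never replaced, so iterating the original (key, group) pairs is exact on Pre_.
def pvLoopA (model : PySem.Dict String (PySem.Dict String (PySem.Dict String String)))
    (groups : List (String × PySem.Dict String (PySem.Dict String String)))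
    (st : PySem.Dict String (PySem.Dict String (PySem.Dict String String)) × PySem.Dict String (PySem.Dict String (PySem.Dict String String))) :
    PySem.Dict String (PySem.Dict String (PySem.Dict String String)) × PySem.Dict String (PySem.Dict String (PySem.Dict String String)) :=
  groups.foldl (fun st p =>
    if !(pvElementKey.contains p.1) && !(pvPrefixKey.contains p.1) then
      p.2.items.foldl (fun st q => pvTargetKey.foldl (pvStepAKey model q.2) st) st
    else st) st

-- A's final `for key in pending:` merge loop
def pvMergePendingA (pending : PySem.Dict String (PySem.Dict String (PySem.Dict String String)))
    (base : PySem.Dict String (PySem.Dict String (PySem.Dict String String))) :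
    PySem.Dict String (PySem.Dict String (PySem.Dict String String)) :=
  pending.items.foldl (fun bb p =>
    if !(bb.contains p.1) then bb.insert p.1 p.2
    else bb.insert p.1 (p.2.items.foldl (fun g q => g.insert q.1 q.2) (bb.getD p.1 PySem.Dict.empty))) base

def mergeNode (base : List (String × List (String × List (String × String)))) (model : List (String × List (String × List (String × String)))) : List (String × List (String × List (String × String))) :=
  let b := pvToDict base
  let m := pvToDict model
  let st := pvLoopA m b.items (b, PySem.Dict.empty)
  pvOfDict (pvMergePendingA st.2 st.1)

-- ===== PORT B =====
def pvSkipKey : List String := ["entity","agent","activity","prefix"]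

-- `index`: identifier -> (typeKey, obj), first model group wins
def pvBuildIndex (m : PySem.Dict String (PySem.Dict String (PySem.Dict String String))) : PySem.Dict String (String × PySem.Dict String String) :=
  m.items.foldl (fun index p =>
    p.2.items.foldl (fun index q => if index.contains q.1 then index else index.insert q.1 (p.1, q.2)) index) PySem.Dict.empty

-- body of B's innermost `for key, ident in obj.items():` loop
def pvStepB (index : PySem.Dict String (String × PySem.Dict String String)) (present : PySem.Set String)
    (st : PySem.Dict String (PySem.Dict String (PySem.Dict String String)) × PySem.Dict String (PySem.Dict String (PySem.Dict String String)) × PySem.Set String)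
    (kv : String × String) : PySem.Dict String (PySem.Dict String (PySem.Dict String String)) × PySem.Dict String (PySem.Dict String (PySem.Dict String String)) × PySem.Set String :=
  if pvTargetKey.contains kv.1 && !(PySem.Set.contains present kv.2) && !(PySem.Set.contains st.2.2 kv.2) then
    let handled := PySem.Set.add st.2.2 kv.2
    match index.get? kv.2 with
    | some (newTypeKey, newObj) =>
      if st.1.contains newTypeKey then
        (st.1.insert newTypeKey ((st.1.getD newTypeKey PySem.Dict.empty).insert kv.2 newObj), st.2.1, handled)
      else
        -- pending.setdefault(newTypeKey, {})[ident] = newObj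
        (st.1, st.2.1.insert newTypeKey ((st.2.1.getD newTypeKey PySem.Dict.empty).insert kv.2 newObj), handled)
    | none => (st.1, st.2.1, handled)
  else st

def pvLoopB (index : PySem.Dict String (String × PySem.Dict String String)) (present : PySem.Set String)
    (groups : List (String × PySem.Dict String (PySem.Dict String String)))
    (st : PySem.Dict String (PySem.Dict String (PySem.Dict String String)) × PySem.Dict String (PySem.Dict String (PySem.Dict String String)) × PySem.Set String) :
    PySem.Dict String (PySem.Dict String (PySem.Dict String String)) × PySem.Dict String (PySem.Dict String (PySem.Dict String String)) × PySem.Set String :=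
  groups.foldl (fun st p =>
    if pvSkipKey.contains p.1 then st
    else p.2.values.foldl (fun st obj => obj.items.foldl (pvStepB index present) st) st) st

def mergeNode_alt (base : List (String × List (String × List (String × String)))) (model : List (String × List (String × List (String × String)))) : List (String × List (String × List (String × String))) :=
  let b := pvToDict base
  let m := pvToDict model
  let present : PySem.Set String := PySem.Set.ofList (b.values.flatMap (fun g => g.keys))
  let index := pvBuildIndex m
  let st := pvLoopB index present b.items (b, PySem.Dict.empty, PySem.Set.empty)
  pvOfDict (st.1.update st.2.1.items)

-- ===== PRECONDITION & SPEC =====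
-- helpers for Pre_ (independent of both ports)
def pvHasId (base : List (String × List (String × List (String × String)))) (ident : String) : Bool :=
  base.any (fun p => p.2.any (fun q => q.1 = ident))

def pvResolveTy (model : List (String × List (String × List (String × String)))) (ident : String) : Option String :=
  model.findSome? (fun p => if p.2.any (fun q => q.1 = ident) then some p.1 else none)

-- the referenced identifiers of one edge object that are missing from base
def pvRelevant (base : List (String × List (String × List (String × String)))) (obj : List (String × String)) : List String :=
  (obj.filter (fun kv => pvTargetKey.contains kv.1 && !(pvHasId base kv.2))).map (fun kv => kv.2)

def pvNodupAll (b : List (String × List (String × List (String × String)))) : Bool :=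
  decide (b.map (fun p => p.1)).Nodup && b.all (fun p => decide (p.2.map (fun q => q.1)).Nodup && p.2.all (fun q => decide (q.2.map (fun r => r.1)).Nodup))

-- Pre_ excludes (a) duplicate keys inside any dict level (impossible for a real Python dict, accidental in
-- the association-list encoding), (b) edge objects referencing two or more DISTINCT missing identifiers,
-- where A's output order follows Python's hash-randomized set-iteration order, and (c) inputs where a
-- missing identifier resolves into a relation group of base itself, where A mutates a dict it is still
-- iterating (RuntimeError) or rescans entries it has just inserted.
def Pre_mergeNode (base : List (String × List (String × List (String × String)))) (model : List (String × List (String × List (String × String)))) : Prop :=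
  pvNodupAll base = true ∧ pvNodupAll model = true ∧
  ∀ p ∈ base, pvSkipKey.contains p.1 = false → ∀ q ∈ p.2,
    (∀ x ∈ pvRelevant base q.2, ∀ y ∈ pvRelevant base q.2, x = y) ∧
    (∀ x ∈ pvRelevant base q.2,
       ((pvResolveTy model x).all (fun t2 => pvSkipKey.contains t2 || !((base.map (fun r => r.1)).contains t2))) = true)

instance (base : List (String × List (String × List (String × String)))) (model : List (String × List (String × List (String × String)))) : Decidable (Pre_mergeNode base model) := by unfold Pre_mergeNode; infer_instance

def pvWitness_mergeNode : (List (String × List (String × List (String × String)))) × (List (String × List (String × List (String × String)))) :=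
  ([("entity", []), ("used", [("r1", [("prov:entity", "n1"), ("note", "x")])])],
   [("activity", [("n1", [("k", "v")])])])

def Spec_mergeNode (base : List (String × List (String × List (String × String)))) (model : List (String × List (String × List (String × String)))) (out : List (String × List (String × List (String × String)))) : Prop := out = mergeNode_alt base model
instance (base : List (String × List (String × List (String × String)))) (model : List (String × List (String × List (String × String)))) (out : List (String × List (String × List (String × String)))) : Decidable (Spec_mergeNode base model out) := by unfold Spec_mergeNode; infer_instance

-- ===== CLAIM (what is proved, stated in full; the proofs are below) =====
def Claim_equal_mergeNode : Prop := ∀ (base : List (String × List (String × List (String × String)))) (model : List (String × List (String × List (String × String)))), Dom_mergeNode base model → Pre_mergeNode base model → Spec_mergeNode base model (mergeNode base model)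

-- ===== LEMMAS AND PROOFS =====

-- short names for the three dict layers (proof-side only)
abbrev TO := PySem.Dict String String
abbrev TG := PySem.Dict String TO
abbrev TB := PySem.Dict String TG
abbrev AState := TB × TB
abbrev BState := TB × TB × PySem.Set String

-- A's per-identifier action (pvStepAKey after the key lookup)
def stepA (m : TB) (st : AState) (identifier : String) : AState :=
  if findIdentifier st.1 identifier then st
  else
    match extractElement m identifier with
    | some (newTypeKey, newObj) =>
      if st.1.contains newTypeKey = false then
        if st.2.contains newTypeKey = false then
          (st.1, st.2.insert newTypeKey (PySem.Dict.mk [(identifier, newObj)]))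
        else
          (st.1, st.2.insert newTypeKey ((st.2.getD newTypeKey PySem.Dict.empty).insert identifier newObj))
      else
        (st.1.insert newTypeKey ((st.1.getD newTypeKey PySem.Dict.empty).insert identifier newObj), st.2)
    | none => st

-- B's per-identifier action (pvStepB after the key test)
def stepB (ix : PySem.Dict String (String × TO)) (pres : PySem.Set String) (st : BState) (ident : String) : BState :=
  if !(PySem.Set.contains pres ident) && !(PySem.Set.contains st.2.2 ident) then
    let handled := PySem.Set.add st.2.2 ident
    match ix.get? ident with
    | some (newTypeKey, newObj) =>
      if st.1.contains newTypeKey then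
        (st.1.insert newTypeKey ((st.1.getD newTypeKey PySem.Dict.empty).insert ident newObj), st.2.1, handled)
      else
        (st.1, st.2.1.insert newTypeKey ((st.2.1.getD newTypeKey PySem.Dict.empty).insert ident newObj), handled)
    | none => (st.1, st.2.1, handled)
  else st

lemma stepAKey_split (m : TB) (obj : TO) (st : AState) (key : String) :
    pvStepAKey m obj st key = if obj.contains key then stepA m st (obj.getD key "") else st := rfl

lemma stepB_split (ix : PySem.Dict String (String × TO)) (pres : PySem.Set String) (st : BState) (kv : String × String) :
    pvStepB ix pres st kv = if pvTargetKey.contains kv.1 then stepB ix pres st kv.2 else st := by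
  by_cases h : pvTargetKey.contains kv.1 = true <;>
    simp only [pvStepB, stepB, h, Bool.true_and, Bool.false_and, if_true] <;> rfl

-- event lists of one edge object
def evA (obj : TO) : List String := (pvTargetKey.filter (fun k => obj.contains k)).map (fun k => obj.getD k "")
def evB (obj : TO) : List String := (obj.items.filter (fun kv => pvTargetKey.contains kv.1)).map (fun kv => kv.2)
def pvMissing (b0 : TB) (x : String) : Bool := !(findIdentifier b0 x)

lemma skip_eq (t : String) :
    (!(pvElementKey.contains t) && !(pvPrefixKey.contains t)) = !(pvSkipKey.contains t) := by
  simp [pvElementKey, pvPrefixKey, pvSkipKey, Bool.and_assoc]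

lemma pres_contains (b0 : TB) (x : String) :
    PySem.Set.contains (PySem.Set.ofList (b0.values.flatMap (fun g => g.keys))) x = findIdentifier b0 x := by
  have hmem : x ∈ PySem.Set.ofList (b0.values.flatMap (fun g => g.keys)) ↔ findIdentifier b0 x = true := by
    rw [PySem.Set.mem_ofList]
    simp only [findIdentifier, List.mem_flatMap, List.any_eq_true, PySem.Dict.values,
      PySem.Dict.contains_iff_mem_keys, List.mem_map]
    constructor
    · rintro ⟨g, ⟨p, hp, rfl⟩, hx⟩; exact ⟨p, hp, hx⟩
    · rintro ⟨p, hp, hx⟩; exact ⟨p.2, ⟨p, hp, rfl⟩, hx⟩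
  rw [show PySem.Set.contains (PySem.Set.ofList (b0.values.flatMap (fun g => g.keys))) x
      = decide (x ∈ PySem.Set.ofList (b0.values.flatMap (fun g => g.keys))) from List.contains_eq_mem _ _]
  by_cases hb : findIdentifier b0 x = true
  · simp [hmem, hb]
  · simp only [Bool.not_eq_true] at hb
    simp [hmem, hb]

lemma insert_self {ν : Type} (d : PySem.Dict String ν) (k : String) (v : ν)
    (hnd : d.keys.Nodup) (h : d.get? k = some v) : d.insert k v = d := by
  have hc : d.contains k = true := by rw [PySem.Dict.contains_eq_isSome_get?, h]; rfl
  apply PySem.Dict.ext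
  rw [PySem.Dict.items_insert_of_contains _ _ hc]
  conv_rhs => rw [← List.map_id d.items]
  apply List.map_congr_left
  intro p hp
  by_cases hk : p.1 == k
  · have hk' : p.1 = k := by simpa using hk
    have : d.get? p.1 = some p.2 := PySem.Dict.get?_of_mem_items d (k := p.1) (v := p.2) (by simpa using hp) hnd
    rw [hk'] at this; rw [h] at this
    simp only [hk, if_pos]
    have : p = (k, v) := by
      obtain ⟨p1, p2⟩ := p; simp_all
    simp [this]
  · simp [hk]

lemma findId_insert_iff (d : TB) (t2 : String) (idv : String) (v : TO) (x : String)
    (hnd : d.keys.Nodup) (ht : d.contains t2 = true) :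
    findIdentifier (d.insert t2 ((d.getD t2 PySem.Dict.empty).insert idv v)) x
      = (findIdentifier d x || x == idv) := by
  have hg : d.get? t2 = some (d.getD t2 PySem.Dict.empty) := by
    rw [PySem.Dict.contains_eq_isSome_get?] at ht
    obtain ⟨g, hg⟩ := Option.isSome_iff_exists.mp ht
    rw [hg, PySem.Dict.getD_eq_get?_getD, hg]; rfl
  have hmem : (t2, d.getD t2 PySem.Dict.empty) ∈ d.items := PySem.Dict.mem_items_of_get?_eq_some d hg
  rw [Bool.eq_iff_iff]
  unfold findIdentifier
  rw [PySem.Dict.items_insert_of_contains _ _ ht, List.any_map]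
  simp only [List.any_eq_true, Bool.or_eq_true, Function.comp]
  constructor
  · rintro ⟨p, hp, hcx⟩
    by_cases hk : p.1 == t2
    · rw [if_pos hk] at hcx
      simp only [PySem.Dict.contains_insert] at hcx
      rcases Bool.or_eq_true_iff.mp hcx with h1 | h2
      · right; exact h1
      · left; exact ⟨(t2, d.getD t2 PySem.Dict.empty), hmem, h2⟩
    · rw [if_neg (by simpa using hk)] at hcx
      left; exact ⟨p, hp, hcx⟩
  · rintro (⟨p, hp, hcx⟩ | hx)
    · by_cases hk : p.1 == t2
      · have hk' : p.1 = t2 := by simpa using hk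
        have hpv : d.get? p.1 = some p.2 := PySem.Dict.get?_of_mem_items d (k := p.1) (v := p.2) (by simpa using hp) hnd
        rw [hk'] at hpv; rw [hg] at hpv
        have hpeq : p = (t2, d.getD t2 PySem.Dict.empty) := by
          obtain ⟨p1, p2⟩ := p; simp_all
        refine ⟨p, hp, ?_⟩
        rw [if_pos hk]
        simp only [PySem.Dict.contains_insert]
        rw [hpeq] at hcx; simp only at hcx
        simp [hcx]
      · exact ⟨p, hp, by rw [if_neg (by simpa using hk)]; exact hcx⟩
    · refine ⟨(t2, d.getD t2 PySem.Dict.empty), hmem, ?_⟩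
      rw [if_pos (by simp)]
      simp only [PySem.Dict.contains_insert]
      simp [hx]

lemma findSome?_mk_get? {α : Type} (l : List (String × TO)) (id : String) (f : TO → α) :
    l.findSome? (fun q => if q.1 == id then some (f q.2) else none)
      = ((PySem.Dict.mk l : PySem.Dict String TO).get? id).map f := by
  induction l with
  | nil => simp [PySem.Dict.get?]
  | cons q t ih =>
    rw [List.findSome?_cons, PySem.Dict.get?_mk_cons]
    by_cases hq : q.1 == id
    · simp [hq]
    · simp only [hq, if_neg, Bool.false_eq_true, not_false_eq_true]
      exact ih

lemma extract_eq (m : TB) (id : String) :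
    extractElement m id = m.items.findSome? (fun p => (p.2.get? id).map (fun v => (p.1, v))) := by
  unfold extractElement
  congr 1
  funext p
  cases hq : p.2.get? id with
  | none =>
    have hc : p.2.contains id = false := by
      rw [PySem.Dict.contains_eq_isSome_get?, hq]; rfl
    simp [hc]
  | some w =>
    have hc : p.2.contains id = true := by
      rw [PySem.Dict.contains_eq_isSome_get?, hq]; rfl
    have hgd : p.2.getD id PySem.Dict.empty = w := by
      rw [PySem.Dict.getD_eq_get?_getD, hq]; rfl
    simp [hc, hgd]

lemma buildInner_get? (t : String) (l : List (String × TO)) (ix : PySem.Dict String (String × TO)) (id : String) :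
    (l.foldl (fun ix q => if ix.contains q.1 then ix else ix.insert q.1 (t, q.2)) ix).get? id
      = (ix.get? id).or (l.findSome? (fun q => if q.1 == id then some (t, q.2) else none)) := by
  induction l generalizing ix with
  | nil => simp
  | cons q tl ih =>
    rw [List.foldl_cons, List.findSome?_cons]
    by_cases hc : ix.contains q.1
    · rw [if_pos hc, ih]
      by_cases hq : q.1 == id
      · have hq' : q.1 = id := by simpa using hq
        subst hq'
        rw [PySem.Dict.contains_eq_isSome_get?] at hc
        obtain ⟨w, hw⟩ := Option.isSome_iff_exists.mp hc
        simp [hw, Option.or]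
      · simp [hq]
    · rw [if_neg hc, ih]
      by_cases hq : q.1 == id
      · have hq' : q.1 = id := by simpa using hq
        subst hq'
        have hnone : ix.get? q.1 = none := by
          rw [PySem.Dict.contains_eq_isSome_get?] at hc
          cases h' : ix.get? q.1 <;> simp_all
        rw [PySem.Dict.get?_insert]
        simp [hnone, Option.or]
      · rw [PySem.Dict.get?_insert]
        have : ¬ id = q.1 := fun h => by simp [h] at hq
        simp [this, hq]

lemma buildIndex_get? (m : TB) (id : String) :
    (pvBuildIndex m).get? id = extractElement m id := by
  have haux : ∀ (L : List (String × TG)) (ix : PySem.Dict String (String × TO)),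
      (L.foldl (fun index p =>
        p.2.items.foldl (fun index q => if index.contains q.1 then index else index.insert q.1 (p.1, q.2)) index) ix).get? id
      = (ix.get? id).or (L.findSome? (fun p => (p.2.get? id).map (fun v => (p.1, v)))) := by
    intro L
    induction L with
    | nil => simp
    | cons p tl ih =>
      intro ix
      rw [List.foldl_cons, List.findSome?_cons, ih, buildInner_get?]
      rw [findSome?_mk_get? (f := fun v => (p.1, v))]
      have hmk : (PySem.Dict.mk p.2.items : PySem.Dict String TO) = p.2 := rfl
      rw [hmk, Option.or_assoc]
      cases PySem.Dict.get? p.2 id <;> simp [Option.or]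
  rw [extract_eq, pvBuildIndex, haux]
  simp [PySem.Dict.get?_empty, Option.or]

-- the invariant tying A's state to B's handled set
def pvInv (b0 m : TB) (cur pend : TB) (handled : PySem.Set String) : Prop :=
  cur.keys = b0.keys ∧
  (∀ p ∈ pend.items, p.2.keys.Nodup) ∧
  pend.keys.Nodup ∧
  (∀ t, pend.contains t = true → b0.contains t = false) ∧
  (∀ x, findIdentifier b0 x = true → findIdentifier cur x = true) ∧
  (∀ x, PySem.Set.contains handled x = false → findIdentifier cur x = findIdentifier b0 x) ∧
  (∀ x, PySem.Set.contains handled x = true → findIdentifier cur x = false →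
     ∀ r, extractElement m x = some r →
       b0.contains r.1 = false ∧ ∃ pg, pend.get? r.1 = some pg ∧ pg.get? x = some r.2)

def pvRel (b0 m : TB) (sa : AState) (sb : BState) : Prop :=
  sa.1 = sb.1 ∧ sa.2 = sb.2.1 ∧ pvInv b0 m sa.1 sa.2 sb.2.2

lemma contains_congr_keys (d d' : TB) (h : d.keys = d'.keys) (t : String) :
    d.contains t = d'.contains t := by
  rw [PySem.Dict.contains_eq_decide_mem_keys, PySem.Dict.contains_eq_decide_mem_keys, h]

lemma setc_add (s : PySem.Set String) (e x : String) :
    PySem.Set.contains (PySem.Set.add s e) x = (x == e || PySem.Set.contains s x) := by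
  show List.contains (s.add e) x = (x == e || List.contains s x)
  rw [List.contains_eq_mem x (s.add e), List.contains_eq_mem x s]
  by_cases hx : x = e <;> simp [PySem.Set.mem_add, hx]

lemma stepA_skip_none (m : TB) (st : AState) (e : String)
    (hf : findIdentifier st.1 e = false) (hx : extractElement m e = none) : stepA m st e = st := by
  simp [stepA, hf, hx]

lemma stepA_pend (m : TB) (st : AState) (e t2 : String) (v : TO)
    (hf : findIdentifier st.1 e = false) (hx : extractElement m e = some (t2, v))
    (hc : st.1.contains t2 = false) :
    stepA m st e = (st.1, st.2.insert t2 ((st.2.getD t2 PySem.Dict.empty).insert e v)) := by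
  simp only [stepA, hf, Bool.false_eq_true, if_false, hx, hc]
  rw [if_pos trivial]
  by_cases hp : st.2.contains t2 = false
  · rw [if_pos hp, PySem.Dict.getD_of_not_contains _ _ hp]; rfl
  · rw [if_neg hp]

lemma stepA_base (m : TB) (st : AState) (e t2 : String) (v : TO)
    (hf : findIdentifier st.1 e = false) (hx : extractElement m e = some (t2, v))
    (hc : st.1.contains t2 = true) :
    stepA m st e = (st.1.insert t2 ((st.1.getD t2 PySem.Dict.empty).insert e v), st.2) := by
  simp [stepA, hf, hx, hc]

lemma stepB_skip_handled (ix : PySem.Dict String (String × TO)) (pres : PySem.Set String) (st : BState) (e : String)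
    (h : PySem.Set.contains st.2.2 e = true) : stepB ix pres st e = st := by
  have hm : e ∈ st.2.2 := by simpa using h
  simp [stepB, hm]

lemma stepB_act (ix : PySem.Dict String (String × TO)) (pres : PySem.Set String) (sb : BState) (e : String)
    (hp : PySem.Set.contains pres e = false) (hh : PySem.Set.contains sb.2.2 e = false) :
    stepB ix pres sb e =
      match ix.get? e with
      | some (t2, v) =>
        if sb.1.contains t2 then
          (sb.1.insert t2 ((sb.1.getD t2 PySem.Dict.empty).insert e v), sb.2.1, PySem.Set.add sb.2.2 e)
        else
          (sb.1, sb.2.1.insert t2 ((sb.2.1.getD t2 PySem.Dict.empty).insert e v), PySem.Set.add sb.2.2 e)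
      | none => (sb.1, sb.2.1, PySem.Set.add sb.2.2 e) := by
  show (if !(PySem.Set.contains pres e) && !(PySem.Set.contains sb.2.2 e) then _ else _) = _
  rw [hp, hh]
  rfl

lemma stepA_found (m : TB) (st : AState) (e : String) (h : findIdentifier st.1 e = true) :
    stepA m st e = st := by
  simp [stepA, h]

lemma stepA_keys (m : TB) (st : AState) (e : String) : (stepA m st e).1.keys = st.1.keys := by
  simp only [stepA]
  split
  · rfl
  cases hext : extractElement m e with
  | none => simp
  | some r =>
    obtain ⟨t2, v⟩ := r
    dsimp only
    by_cases hc : st.1.contains t2 = false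
    · simp only [hc, if_pos]
      split <;> rfl
    · have hc' : st.1.contains t2 = true := by revert hc; cases st.1.contains t2 <;> simp
      simp only [hc]
      exact PySem.Dict.keys_insert_of_contains _ _ hc'

lemma stepA_mono (m : TB) (st : AState) (e x : String)
    (hnd : st.1.keys.Nodup) (h : findIdentifier st.1 x = true) :
    findIdentifier (stepA m st e).1 x = true := by
  simp only [stepA]
  split
  · exact h
  cases hext : extractElement m e with
  | none => simp [h]
  | some r =>
    obtain ⟨t2, v⟩ := r
    dsimp only
    by_cases hc : st.1.contains t2 = false
    · simp only [hc, if_pos]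
      split <;> exact h
    · have hc' : st.1.contains t2 = true := by revert hc; cases st.1.contains t2 <;> simp
      rw [hc', if_neg (by simp)]
      rw [show (PySem.Dict.insert st.1 t2 (PySem.Dict.insert (PySem.Dict.getD st.1 t2 PySem.Dict.empty) e v), st.2).1
          = PySem.Dict.insert st.1 t2 (PySem.Dict.insert (PySem.Dict.getD st.1 t2 PySem.Dict.empty) e v) from rfl]
      rw [findId_insert_iff _ _ _ _ _ hnd hc', h]
      rfl

lemma runA_filter (b0 m : TB) (ids : List String) (sa : AState)
    (hnd : sa.1.keys.Nodup)
    (hf : ∀ x, findIdentifier b0 x = true → findIdentifier sa.1 x = true) :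
    ids.foldl (stepA m) sa = (ids.filter (pvMissing b0)).foldl (stepA m) sa := by
  induction ids generalizing sa with
  | nil => rfl
  | cons e tl ih =>
    rw [List.foldl_cons, List.filter_cons]
    by_cases hm : pvMissing b0 e = true
    · rw [if_pos hm, List.foldl_cons]
      exact ih (stepA m sa e) (by rw [stepA_keys]; exact hnd)
        (fun x hx => stepA_mono m sa e x hnd (hf x hx))
    · have hb : findIdentifier b0 e = true := by
        unfold pvMissing at hm; revert hm; cases findIdentifier b0 e <;> simp
      rw [if_neg (by simpa using hm), stepA_found m sa e (hf e hb)]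
      exact ih sa hnd hf

lemma stepB_skip (ix : PySem.Dict String (String × TO)) (pres : PySem.Set String) (st : BState) (e : String)
    (h : PySem.Set.contains pres e = true) : stepB ix pres st e = st := by
  have hm : e ∈ pres := by simpa using h
  simp [stepB, hm]

lemma runB_filter (b0 : TB) (ix : PySem.Dict String (String × TO)) (pres : PySem.Set String)
    (hpres : ∀ id, PySem.Set.contains pres id = findIdentifier b0 id)
    (ids : List String) (sb : BState) :
    ids.foldl (stepB ix pres) sb = (ids.filter (pvMissing b0)).foldl (stepB ix pres) sb := by
  induction ids generalizing sb with
  | nil => rfl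
  | cons e tl ih =>
    rw [List.foldl_cons, List.filter_cons]
    by_cases hm : pvMissing b0 e = true
    · rw [if_pos hm, List.foldl_cons]
      exact ih (stepB ix pres sb e)
    · have hb : findIdentifier b0 e = true := by
        unfold pvMissing at hm; revert hm; cases findIdentifier b0 e <;> simp
      rw [if_neg (by simpa using hm), stepB_skip ix pres sb e (by rw [hpres]; exact hb)]
      exact ih sb

lemma step_pair (b0 m : TB) (ix : PySem.Dict String (String × TO)) (pres : PySem.Set String)
    (hb0 : b0.keys.Nodup)
    (hix : ∀ id, ix.get? id = extractElement m id)
    (hpres : ∀ id, PySem.Set.contains pres id = findIdentifier b0 id)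
    (sa : AState) (sb : BState) (e : String) (h : pvRel b0 m sa sb) :
    pvRel b0 m (stepA m sa e) (stepB ix pres sb e) := by
  obtain ⟨h1, h2, hkeys, hpnd, hpndk, hdis, hmono, hunh, hrep⟩ := h
  have hcurnd : sa.1.keys.Nodup := by rw [hkeys]; exact hb0
  by_cases hpres0 : findIdentifier b0 e = true
  · rw [stepB_skip ix pres sb e (by rw [hpres]; exact hpres0), stepA_found m sa e (hmono e hpres0)]
    exact ⟨h1, h2, hkeys, hpnd, hpndk, hdis, hmono, hunh, hrep⟩
  · have hpres0' : findIdentifier b0 e = false := by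
      revert hpres0; cases findIdentifier b0 e <;> simp
    by_cases hh : PySem.Set.contains sb.2.2 e = true
    · -- e already handled by B; A's reprocessing is a no-op
      rw [stepB_skip_handled ix pres sb e hh]
      by_cases hfa : findIdentifier sa.1 e = true
      · rw [stepA_found m sa e hfa]
        exact ⟨h1, h2, hkeys, hpnd, hpndk, hdis, hmono, hunh, hrep⟩
      · have hfa' : findIdentifier sa.1 e = false := by
          revert hfa; cases findIdentifier sa.1 e <;> simp
        cases hext : extractElement m e with
        | none =>
          rw [stepA_skip_none m sa e hfa' hext]
          exact ⟨h1, h2, hkeys, hpnd, hpndk, hdis, hmono, hunh, hrep⟩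
        | some r =>
          obtain ⟨t2, v⟩ := r
          obtain ⟨hb0t2, pg, hpg, hpgv⟩ := hrep e hh hfa' (t2, v) hext
          have hc : sa.1.contains t2 = false := by
            rw [contains_congr_keys sa.1 b0 hkeys t2]; exact hb0t2
          rw [stepA_pend m sa e t2 v hfa' hext hc]
          have hgd : sa.2.getD t2 PySem.Dict.empty = pg :=
            PySem.Dict.getD_of_get?_eq_some _ _ hpg
          have hpgmem : (t2, pg) ∈ sa.2.items := PySem.Dict.mem_items_of_get?_eq_some _ hpg
          have h5 : pg.insert e v = pg := insert_self pg e v (hpnd _ hpgmem) hpgv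
          have h6 : sa.2.insert t2 pg = sa.2 := insert_self sa.2 t2 pg hpndk hpg
          rw [hgd, h5, h6]
          exact ⟨h1, h2, hkeys, hpnd, hpndk, hdis, hmono, hunh, hrep⟩
    · -- e is new: both sides act
      have hh' : PySem.Set.contains sb.2.2 e = false := by
        revert hh; cases PySem.Set.contains sb.2.2 e <;> simp
      have hfa : findIdentifier sa.1 e = false := by rw [hunh e hh']; exact hpres0'
      have hixe := hix e
      rw [stepB_act ix pres sb e (by rw [hpres]; exact hpres0') hh']
      cases hext : extractElement m e with
      | none =>
        rw [hext] at hixe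
        rw [stepA_skip_none m sa e hfa hext, hixe]
        refine ⟨h1, h2, hkeys, hpnd, hpndk, hdis, hmono, ?_, ?_⟩
        · intro x hx
          rw [setc_add] at hx
          have hx2 : PySem.Set.contains sb.2.2 x = false := by
            revert hx; cases (x == e) <;> cases PySem.Set.contains sb.2.2 x <;> simp
          exact hunh x hx2
        · intro x hx hcur r hr
          rw [setc_add] at hx
          by_cases hxe : x = e
          · subst hxe; rw [hext] at hr; cases hr
          · have hxh : PySem.Set.contains sb.2.2 x = true := by
              have : (x == e) = false := by simp [hxe]
              rw [this, Bool.false_or] at hx; exact hx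
            exact hrep x hxh hcur r hr
      | some r =>
        obtain ⟨t2, v⟩ := r
        rw [hext] at hixe
        rw [hixe]
        by_cases hc : sa.1.contains t2 = true
        · -- the resolved group exists in base
          have hcb : sb.1.contains t2 = true := by rw [← h1]; exact hc
          rw [stepA_base m sa e t2 v hfa hext hc]
          simp only [hcb, if_true]
          refine ⟨by rw [h1], h2, ?_, hpnd, hpndk, hdis, ?_, ?_, ?_⟩
          · rw [PySem.Dict.keys_insert_of_contains _ _ hc]; exact hkeys
          · intro x hx
            rw [findId_insert_iff _ _ _ _ _ hcurnd hc, hmono x hx]; rfl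
          · intro x hx
            rw [setc_add] at hx
            obtain ⟨hxe, hxh⟩ : (x == e) = false ∧ PySem.Set.contains sb.2.2 x = false := by
              revert hx; cases (x == e) <;> cases PySem.Set.contains sb.2.2 x <;> simp
            rw [findId_insert_iff _ _ _ _ _ hcurnd hc, hxe, Bool.or_false]
            exact hunh x hxh
          · intro x hx hcur r hr
            rw [findId_insert_iff _ _ _ _ _ hcurnd hc] at hcur
            obtain ⟨hc1, hc2⟩ : findIdentifier sa.1 x = false ∧ (x == e) = false := by
              revert hcur; cases findIdentifier sa.1 x <;> cases (x == e) <;> simp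
            rw [setc_add, hc2, Bool.false_or] at hx
            exact hrep x hx hc1 r hr
        · -- the resolved group goes to pending
          have hc' : sa.1.contains t2 = false := by
            revert hc; cases sa.1.contains t2 <;> simp
          have hcb : sb.1.contains t2 = false := by rw [← h1]; exact hc'
          have hb0t2 : b0.contains t2 = false := by
            rw [← contains_congr_keys sa.1 b0 hkeys t2]; exact hc'
          rw [stepA_pend m sa e t2 v hfa hext hc']
          simp only [hcb, Bool.false_eq_true, if_false]
          refine ⟨h1, by rw [h2], hkeys, ?_, ?_, ?_, hmono, ?_, ?_⟩
          · intro p hp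
            rcases (PySem.Dict.mem_items_insert _ _ _ p).mp hp with hpe | ⟨hpo, _⟩
            · rw [hpe]
              by_cases hpc : sa.2.contains t2 = true
              · have hpgs : (sa.2.get? t2).isSome := by
                  rw [← PySem.Dict.contains_eq_isSome_get?]; exact hpc
                obtain ⟨pg, hpg⟩ := Option.isSome_iff_exists.mp hpgs
                rw [PySem.Dict.getD_eq_get?_getD, hpg]
                exact PySem.Dict.nodup_keys_insert _ _ _
                  (hpnd _ (PySem.Dict.mem_items_of_get?_eq_some _ hpg))
              · have hpc' : sa.2.contains t2 = false := by
                  revert hpc; cases sa.2.contains t2 <;> simp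
                rw [PySem.Dict.getD_of_not_contains _ _ hpc']
                exact PySem.Dict.nodup_keys_insert _ _ _ PySem.Dict.nodup_keys_empty
            · exact hpnd p hpo
          · exact PySem.Dict.nodup_keys_insert _ _ _ hpndk
          · intro t ht
            rw [PySem.Dict.contains_eq_decide_mem_keys] at ht
            rcases (PySem.Dict.mem_keys_insert _ _ _ _).mp (of_decide_eq_true ht) with rfl | hold
            · exact hb0t2
            · exact hdis t (by rw [PySem.Dict.contains_eq_decide_mem_keys]; exact decide_eq_true hold)
          · intro x hx
            rw [setc_add] at hx
            have hx2 : PySem.Set.contains sb.2.2 x = false := by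
              revert hx; cases (x == e) <;> cases PySem.Set.contains sb.2.2 x <;> simp
            exact hunh x hx2
          · intro x hx hcur r hr
            rw [setc_add] at hx
            by_cases hxe : x = e
            · subst hxe
              rw [hext] at hr
              injection hr with hr'
              subst hr'
              refine ⟨hb0t2, _, PySem.Dict.get?_insert_self _ _ _, ?_⟩
              exact PySem.Dict.get?_insert_self _ _ _
            · have hxh : PySem.Set.contains sb.2.2 x = true := by
                have hbe : (x == e) = false := by simp [hxe]
                rw [hbe, Bool.false_or] at hx; exact hx
              obtain ⟨hbr, pg, hpg, hpgv⟩ := hrep x hxh hcur r hr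
              refine ⟨hbr, ?_⟩
              by_cases hrt : r.1 = t2
              · rw [hrt] at hpg
                have hgd : sa.2.getD t2 PySem.Dict.empty = pg :=
                  PySem.Dict.getD_of_get?_eq_some _ _ hpg
                refine ⟨_, by rw [hrt]; exact PySem.Dict.get?_insert_self _ _ _, ?_⟩
                rw [PySem.Dict.get?_insert_of_ne _ _ (fun hxx => hxe hxx), hgd]
                exact hpgv
              · exact ⟨pg, by rw [PySem.Dict.get?_insert_of_ne _ _ hrt]; exact hpg, hpgv⟩

lemma run_pair (b0 m : TB) (ix : PySem.Dict String (String × TO)) (pres : PySem.Set String)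
    (hb0 : b0.keys.Nodup)
    (hix : ∀ id, ix.get? id = extractElement m id)
    (hpres : ∀ id, PySem.Set.contains pres id = findIdentifier b0 id)
    (ids : List String) (sa : AState) (sb : BState) (h : pvRel b0 m sa sb) :
    pvRel b0 m (ids.foldl (stepA m) sa) (ids.foldl (stepB ix pres) sb) := by
  induction ids generalizing sa sb with
  | nil => exact h
  | cons e t ih => exact ih _ _ (step_pair b0 m ix pres hb0 hix hpres sa sb e h)

lemma perm_ev (obj : TO) (hnd : obj.keys.Nodup) : (evA obj).Perm (evB obj) := by
  have hevB : evB obj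
      = ((obj.items.filter (fun kv => pvTargetKey.contains kv.1)).map (fun kv => kv.1)).map
          (fun k => obj.getD k "") := by
    unfold evB
    rw [List.map_map]
    apply List.map_congr_left
    intro kv hkv
    have hkv' : kv ∈ obj.items := List.mem_of_mem_filter hkv
    have : obj.get? kv.1 = some kv.2 :=
      PySem.Dict.get?_of_mem_items obj (k := kv.1) (v := kv.2) (by simpa using hkv') hnd
    simp [Function.comp, PySem.Dict.getD_eq_get?_getD, this]
  have hndA : ((pvTargetKey.filter (fun k => obj.contains k))).Nodup :=
    (by decide : pvTargetKey.Nodup).filter _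
  have hndB : ((obj.items.filter (fun kv => pvTargetKey.contains kv.1)).map (fun kv => kv.1)).Nodup := by
    have hsub : ((obj.items.filter (fun kv => pvTargetKey.contains kv.1)).map (fun kv => kv.1)).Sublist
        (obj.items.map (fun kv => kv.1)) := List.filter_sublist.map _
    exact hnd.sublist hsub
  have hperm : (pvTargetKey.filter (fun k => obj.contains k)).Perm
      ((obj.items.filter (fun kv => pvTargetKey.contains kv.1)).map (fun kv => kv.1)) := by
    rw [List.perm_ext_iff_of_nodup hndA hndB]
    intro k
    simp only [List.mem_filter, List.mem_map, PySem.Dict.contains_iff_mem_keys, PySem.Dict.keys,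
      List.mem_map] at *
    constructor
    · rintro ⟨hkT, ⟨kv, hkv, rfl⟩⟩
      exact ⟨kv, ⟨hkv, by rw [List.contains_eq_mem]; simpa using hkT⟩, rfl⟩
    · rintro ⟨kv, ⟨hkv, hT⟩, rfl⟩
      refine ⟨by rw [List.contains_eq_mem] at hT; simpa using hT, ⟨kv, hkv, rfl⟩⟩
  rw [hevB]
  exact hperm.map _

lemma eq_of_perm_mono {l1 l2 : List String} (h : l1.Perm l2)
    (mono : ∀ x ∈ l2, ∀ y ∈ l2, x = y) : l1 = l2 := by
  cases l2 with
  | nil => exact h.eq_nil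
  | cons a t =>
    have h2 : ∀ b ∈ (a :: t), b = a := fun b hb => mono b hb a (List.mem_cons_self)
    have h1 : ∀ b ∈ l1, b = a := fun b hb => mono b (h.subset hb) a (List.mem_cons_self)
    rw [List.eq_replicate_of_mem h1, List.eq_replicate_of_mem h2, h.length_eq]

lemma obj_pair (b0 m : TB) (ix : PySem.Dict String (String × TO)) (pres : PySem.Set String)
    (hb0 : b0.keys.Nodup)
    (hix : ∀ id, ix.get? id = extractElement m id)
    (hpres : ∀ id, PySem.Set.contains pres id = findIdentifier b0 id)
    (obj : TO) (hobj : obj.keys.Nodup)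
    (hmono2 : ∀ x ∈ (evB obj).filter (pvMissing b0), ∀ y ∈ (evB obj).filter (pvMissing b0), x = y)
    (sa : AState) (sb : BState) (h : pvRel b0 m sa sb) :
    pvRel b0 m (pvTargetKey.foldl (pvStepAKey m obj) sa) (obj.items.foldl (pvStepB ix pres) sb) := by
  obtain ⟨h1, h2, hkeys, hpnd, hpndk, hdis, hmono, hunh, hrep⟩ := h
  have hA : pvTargetKey.foldl (pvStepAKey m obj) sa = (evA obj).foldl (stepA m) sa := by
    unfold evA
    rw [List.foldl_map, List.foldl_filter]
    rw [show (pvStepAKey m obj)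
        = (fun st k => if obj.contains k = true then stepA m st (obj.getD k "") else st) from
      funext fun st => funext fun k => stepAKey_split m obj st k]
  have hB : obj.items.foldl (pvStepB ix pres) sb = (evB obj).foldl (stepB ix pres) sb := by
    unfold evB
    rw [List.foldl_map, List.foldl_filter]
    rw [show (pvStepB ix pres)
        = (fun st kv => if pvTargetKey.contains kv.1 = true then stepB ix pres st kv.2 else st) from
      funext fun st => funext fun kv => stepB_split ix pres st kv]
  rw [hA, hB]
  rw [runA_filter b0 m (evA obj) sa (by rw [hkeys]; exact hb0) (fun x hx => hmono x hx)]
  rw [runB_filter b0 ix pres hpres (evB obj) sb]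
  rw [eq_of_perm_mono ((perm_ev obj hobj).filter _) hmono2]
  exact run_pair b0 m ix pres hb0 hix hpres _ sa sb ⟨h1, h2, hkeys, hpnd, hpndk, hdis, hmono, hunh, hrep⟩

lemma grp_pair (b0 m : TB) (ix : PySem.Dict String (String × TO)) (pres : PySem.Set String)
    (hb0 : b0.keys.Nodup)
    (hix : ∀ id, ix.get? id = extractElement m id)
    (hpres : ∀ id, PySem.Set.contains pres id = findIdentifier b0 id)
    (items : List (String × TO))
    (hq : ∀ q ∈ items, q.2.keys.Nodup ∧
          (∀ x ∈ (evB q.2).filter (pvMissing b0), ∀ y ∈ (evB q.2).filter (pvMissing b0), x = y))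
    (sa : AState) (sb : BState) (h : pvRel b0 m sa sb) :
    pvRel b0 m (items.foldl (fun st q => pvTargetKey.foldl (pvStepAKey m q.2) st) sa)
               (items.foldl (fun st q => q.2.items.foldl (pvStepB ix pres) st) sb) := by
  induction items generalizing sa sb with
  | nil => exact h
  | cons q tl ih =>
    rw [List.foldl_cons, List.foldl_cons]
    exact ih (fun q' hq' => hq q' (List.mem_cons_of_mem _ hq')) _ _
      (obj_pair b0 m ix pres hb0 hix hpres q.2 (hq q List.mem_cons_self).1
        (hq q List.mem_cons_self).2 sa sb h)

lemma loop_pair (b0 m : TB) (ix : PySem.Dict String (String × TO)) (pres : PySem.Set String)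
    (hb0 : b0.keys.Nodup)
    (hix : ∀ id, ix.get? id = extractElement m id)
    (hpres : ∀ id, PySem.Set.contains pres id = findIdentifier b0 id)
    (groups : List (String × TG))
    (hg : ∀ p ∈ groups, pvSkipKey.contains p.1 = false → ∀ q ∈ p.2.items,
            q.2.keys.Nodup ∧
            (∀ x ∈ (evB q.2).filter (pvMissing b0), ∀ y ∈ (evB q.2).filter (pvMissing b0), x = y))
    (sa : AState) (sb : BState) (h : pvRel b0 m sa sb) :
    pvRel b0 m (pvLoopA m groups sa) (pvLoopB ix pres groups sb) := by
  induction groups generalizing sa sb with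
  | nil => exact h
  | cons p tl ih =>
    unfold pvLoopA pvLoopB
    rw [List.foldl_cons, List.foldl_cons]
    rw [skip_eq p.1]
    by_cases hs : pvSkipKey.contains p.1 = true
    · rw [hs]
      simp only [Bool.not_true, Bool.false_eq_true, if_false, if_true]
      exact ih (fun p' hp' => hg p' (List.mem_cons_of_mem _ hp')) sa sb h
    · have hs' : pvSkipKey.contains p.1 = false := by
        revert hs; cases pvSkipKey.contains p.1 <;> simp
      rw [hs']
      simp only [Bool.not_false, if_true, Bool.false_eq_true, if_false]
      apply ih (fun p' hp' => hg p' (List.mem_cons_of_mem _ hp'))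
      have hvals : p.2.values.foldl (fun st obj => obj.items.foldl (pvStepB ix pres) st) sb
          = p.2.items.foldl (fun st q => q.2.items.foldl (pvStepB ix pres) st) sb := by
        show (p.2.items.map (fun x => x.2)).foldl _ sb = _
        rw [List.foldl_map]
      rw [hvals]
      exact grp_pair b0 m ix pres hb0 hix hpres p.2.items
        (hg p List.mem_cons_self hs') sa sb h

lemma merge_eq (pend cur : TB)
    (hd : ∀ p ∈ pend.items, cur.contains p.1 = false) (hnd : pend.keys.Nodup) :
    pvMergePendingA pend cur = cur.update pend.items := by
  unfold pvMergePendingA PySem.Dict.update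
  have haux : ∀ (l : List (String × TG)) (bb : TB), (∀ p ∈ l, bb.contains p.1 = false) →
      (l.map (fun p => p.1)).Nodup →
      l.foldl (fun bb p =>
        if !(bb.contains p.1) then bb.insert p.1 p.2
        else bb.insert p.1 (p.2.items.foldl (fun g q => g.insert q.1 q.2) (bb.getD p.1 PySem.Dict.empty))) bb
      = l.foldl (fun acc p => acc.insert p.1 p.2) bb := by
    intro l
    induction l with
    | nil => intro bb _ _; rfl
    | cons p tl ih =>
      intro bb hdis hnd'
      rw [List.foldl_cons, List.foldl_cons, if_pos (by rw [hdis p List.mem_cons_self]; rfl)]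
      apply ih
      · intro q hq
        rw [PySem.Dict.contains_insert]
        have h1 : bb.contains q.1 = false := hdis q (List.mem_cons_of_mem _ hq)
        have h2 : ¬ q.1 = p.1 := by
          simp only [List.map_cons, List.nodup_cons] at hnd'
          intro hqe; exact hnd'.1 (hqe ▸ List.mem_map_of_mem hq)
        simp [h1, h2]
      · simp only [List.map_cons, List.nodup_cons] at hnd'
        exact hnd'.2
  exact haux pend.items cur (fun p hp => hd p hp) (by exact hnd)

lemma keys_toDict (b : List (String × List (String × List (String × String)))) :
    (pvToDict b).keys = b.map (fun p => p.1) := by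
  unfold pvToDict
  rw [PySem.Dict.keys_mk, List.map_map]
  rfl

lemma findId_toDict (b : List (String × List (String × List (String × String)))) (x : String) :
    findIdentifier (pvToDict b) x = pvHasId b x := by
  unfold findIdentifier pvHasId pvToDict
  rw [show (PySem.Dict.mk (b.map (fun p => (p.1, PySem.Dict.mk (p.2.map (fun q => (q.1, PySem.Dict.mk q.2)))))) :
      PySem.Dict String TG).items
      = b.map (fun p => (p.1, PySem.Dict.mk (p.2.map (fun q => (q.1, PySem.Dict.mk q.2))))) from rfl]
  rw [List.any_map]
  have hfun : ((fun p : String × TG => p.2.contains x) ∘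
        (fun p : String × List (String × List (String × String)) =>
          (p.1, PySem.Dict.mk (p.2.map (fun q => (q.1, PySem.Dict.mk q.2))))))
      = (fun p => p.2.any (fun q => decide (q.1 = x))) := by
    funext p
    show (PySem.Dict.mk (p.2.map (fun q => (q.1, PySem.Dict.mk q.2))) : TG).contains x
        = p.2.any (fun q => decide (q.1 = x))
    rw [PySem.Dict.contains_mk, List.any_map]
    rw [Bool.eq_iff_iff]
    simp [List.any_eq_true]
  rw [hfun]

lemma relevant_bridge (b : List (String × List (String × List (String × String))))
    (objraw : List (String × String)) :
    (evB (PySem.Dict.mk objraw)).filter (pvMissing (pvToDict b)) = pvRelevant b objraw := by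
  unfold evB pvRelevant
  rw [show (PySem.Dict.mk objraw : TO).items = objraw from rfl]
  rw [List.filter_map, List.filter_filter]
  congr 1
  apply List.filter_congr
  intro kv _
  show (pvMissing (pvToDict b) kv.2 && pvTargetKey.contains kv.1)
      = (pvTargetKey.contains kv.1 && !(pvHasId b kv.2))
  unfold pvMissing
  rw [findId_toDict, Bool.and_comm]

-- ===== VERDICT (by name: the statement is the Claim_ definition above) =====
theorem mergeNode_spec : Claim_equal_mergeNode := by
  unfold Claim_equal_mergeNode
  intro base model _ hpre
  unfold Spec_mergeNode
  obtain ⟨hndB, hndM, hcond⟩ := hpre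
  have hndB' := hndB
  unfold pvNodupAll at hndB'
  simp only [Bool.and_eq_true, decide_eq_true_eq, List.all_eq_true] at hndB'
  obtain ⟨hndB1, hndB2⟩ := hndB'
  have hb0 : (pvToDict base).keys.Nodup := by rw [keys_toDict]; exact hndB1
  have hinit : pvRel (pvToDict base) (pvToDict model)
      ((pvToDict base), PySem.Dict.empty) ((pvToDict base), PySem.Dict.empty, PySem.Set.empty) := by
    refine ⟨rfl, rfl, rfl, ?_, PySem.Dict.nodup_keys_empty, ?_, fun x h => h, fun x _ => rfl, ?_⟩
    · intro p hp
      simp [PySem.Dict.empty] at hp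
    · intro t ht
      rw [PySem.Dict.contains_empty] at ht
      cases ht
    · intro x hx
      simp [PySem.Set.empty, PySem.Set.contains] at hx
  have hg : ∀ p' ∈ (pvToDict base).items, pvSkipKey.contains p'.1 = false →
      ∀ q' ∈ p'.2.items, q'.2.keys.Nodup ∧
        (∀ x ∈ (evB q'.2).filter (pvMissing (pvToDict base)),
         ∀ y ∈ (evB q'.2).filter (pvMissing (pvToDict base)), x = y) := by
    intro p' hp' hskip q' hq'
    rw [show (pvToDict base).items
        = base.map (fun p => (p.1, PySem.Dict.mk (p.2.map (fun q => (q.1, PySem.Dict.mk q.2))))) from rfl] at hp'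
    obtain ⟨p, hp, rfl⟩ := List.mem_map.mp hp'
    simp only at hq' hskip
    obtain ⟨q, hq, rfl⟩ := List.mem_map.mp hq'
    constructor
    · rw [show (PySem.Dict.mk q.2 : TO).keys = q.2.map (fun r => r.1) from PySem.Dict.keys_mk q.2]
      obtain ⟨-, hinner⟩ := hndB2 p hp
      exact hinner q hq
    · rw [relevant_bridge]
      exact (hcond p hp hskip q hq).1
  have hrel := loop_pair (pvToDict base) (pvToDict model) (pvBuildIndex (pvToDict model))
      (PySem.Set.ofList ((pvToDict base).values.flatMap (fun g => g.keys)))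
      hb0 (fun id => buildIndex_get? (pvToDict model) id) (fun id => pres_contains (pvToDict base) id)
      (pvToDict base).items hg
      ((pvToDict base), PySem.Dict.empty) ((pvToDict base), PySem.Dict.empty, PySem.Set.empty) hinit
  obtain ⟨r1, r2, rkeys, rpnd, rpndk, rdis, -, -, -⟩ := hrel
  show mergeNode base model = mergeNode_alt base model
  show pvOfDict (pvMergePendingA
      (pvLoopA (pvToDict model) (pvToDict base).items ((pvToDict base), PySem.Dict.empty)).2
      (pvLoopA (pvToDict model) (pvToDict base).items ((pvToDict base), PySem.Dict.empty)).1)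
    = pvOfDict ((pvLoopB (pvBuildIndex (pvToDict model))
        (PySem.Set.ofList ((pvToDict base).values.flatMap (fun g => g.keys)))
        (pvToDict base).items ((pvToDict base), PySem.Dict.empty, PySem.Set.empty)).1.update
        (pvLoopB (pvBuildIndex (pvToDict model))
        (PySem.Set.ofList ((pvToDict base).values.flatMap (fun g => g.keys)))
        (pvToDict base).items ((pvToDict base), PySem.Dict.empty, PySem.Set.empty)).2.1.items)
  rw [← r1, ← r2]
  congr 1
  apply merge_eq
  · intro p hp
    have hc : (pvLoopA (pvToDict model) (pvToDict base).items ((pvToDict base), PySem.Dict.empty)).2.contains p.1 = true := by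
      rw [PySem.Dict.contains_eq_decide_mem_keys]
      exact decide_eq_true (PySem.Dict.mem_keys_of_mem_items _ hp)
    rw [contains_congr_keys _ (pvToDict base) rkeys p.1]
    exact rdis p.1 hc
  · exact rpndk
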